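-- pv_equiv track=rewrite | github.com/cyb66666/SelfDistill | src/training/data.py | split_mgrs_records
-- ===== SOURCE A (Python) =====
-- def split_mgrs_records(data_list, train_tar_count, val_tar_count):
--     """
--     将 MGRS JSON 列表按 global_filepath 排序后，均分为 S=train+val 个连续块；
--     训练集为前 train_tar_count 块拼接，验证集为剩余 val_tar_count 块拼接。
--     """
--     if train_tar_count < 0 or val_tar_count < 0:
--         raise ValueError("train_tar_count and val_tar_count must be non-negative")
--     S = train_tar_count + val_tar_count
--     if S <= 0:
--         raise ValueError("train_tar_count + val_tar_count must be positive")
--     sorted_list = sorted(data_list, key=lambda x: str(x.get("global_filepath", "")))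
--     n = len(sorted_list)
--     boundaries = [(i * n) // S for i in range(S + 1)]
--     chunks = [sorted_list[boundaries[i]: boundaries[i + 1]] for i in range(S)]
--     train_records = []
--     for j in range(train_tar_count):
--         train_records.extend(chunks[j])
--     val_records = []
--     for j in range(train_tar_count, S):
--         val_records.extend(chunks[j])
--     return train_records, val_records
-- ===== SOURCE B (Python) =====
-- def split_mgrs_records(data_list, train_tar_count, val_tar_count):
--     """Same validation and sort as A, then a single split index instead of
--     building boundaries, chunks and two extend loops."""
--     if train_tar_count < 0 or val_tar_count < 0:
--         raise ValueError("train_tar_count and val_tar_count must be non-negative")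
--     S = train_tar_count + val_tar_count
--     if S <= 0:
--         raise ValueError("train_tar_count + val_tar_count must be positive")
--     sorted_list = sorted(data_list, key=lambda x: str(x.get("global_filepath", "")))
--     cut = (train_tar_count * len(sorted_list)) // S
--     return sorted_list[:cut], sorted_list[cut:]
-- ===== Notes on version B (the rewrite author's own statement) =====
-- stated objective: simpler
-- what changed: B keeps the validation and the sort but replaces the boundaries list, the chunk table and the two extend loops by a single split index cut = (train_tar_count*n)//S and two slices, since the concatenation of consecutive chunks is one contiguous slice.
import Mathlib
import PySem

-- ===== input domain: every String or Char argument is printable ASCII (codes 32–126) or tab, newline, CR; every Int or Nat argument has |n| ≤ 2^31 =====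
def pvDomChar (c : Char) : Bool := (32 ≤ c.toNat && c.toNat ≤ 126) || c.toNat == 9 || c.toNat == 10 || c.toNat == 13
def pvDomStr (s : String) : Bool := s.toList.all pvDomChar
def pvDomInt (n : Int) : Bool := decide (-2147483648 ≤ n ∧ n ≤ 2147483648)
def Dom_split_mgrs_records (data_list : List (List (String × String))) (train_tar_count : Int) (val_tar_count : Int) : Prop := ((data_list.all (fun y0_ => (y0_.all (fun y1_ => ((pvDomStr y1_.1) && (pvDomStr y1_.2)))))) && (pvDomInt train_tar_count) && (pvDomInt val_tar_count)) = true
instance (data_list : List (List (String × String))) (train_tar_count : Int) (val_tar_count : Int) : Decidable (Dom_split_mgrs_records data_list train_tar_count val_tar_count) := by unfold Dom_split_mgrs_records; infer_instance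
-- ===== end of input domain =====

-- B replaces the boundaries list, the chunk table and the two extend loops of A by one
-- split index cut = (train_tar_count*n)//S and two slices (objective: simpler).

-- ===== PORT A =====
def split_mgrs_records (data_list : List (List (String × String))) (train_tar_count : Int) (val_tar_count : Int) : (List (List (String × String))) × (List (List (String × String))) :=
  if train_tar_count < 0 ∨ val_tar_count < 0 then ([], [])   -- raise ValueError: excluded by Pre_
  else
    let S : Int := train_tar_count + val_tar_count
    if S ≤ 0 then ([], [])                                   -- raise ValueError: excluded by Pre_
    else
      let sortedList := PySem.List.sorted data_list (fun x => (PySem.Dict.mk x).getD "global_filepath" "") false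
      let n : Int := sortedList.length
      let boundaries : List Int := (PySem.List.pyRange 0 (S + 1) 1).map (fun i => PySem.Int.floordiv (i * n) S)
      let chunks := (PySem.List.pyRange 0 S 1).map (fun i =>
        PySem.List.slice sortedList (some (PySem.List.pyGetD boundaries i 0)) (some (PySem.List.pyGetD boundaries (i + 1) 0)))
      let train_records := (PySem.List.pyRange 0 train_tar_count 1).foldl
        (fun acc j => acc ++ PySem.List.pyGetD chunks j []) []
      let val_records := (PySem.List.pyRange train_tar_count S 1).foldl
        (fun acc j => acc ++ PySem.List.pyGetD chunks j []) []
      (train_records, val_records)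

-- ===== PORT B =====
def split_mgrs_records_alt (data_list : List (List (String × String))) (train_tar_count : Int) (val_tar_count : Int) : (List (List (String × String))) × (List (List (String × String))) :=
  if train_tar_count < 0 ∨ val_tar_count < 0 then ([], [])   -- raise ValueError: excluded by Pre_
  else
    let S : Int := train_tar_count + val_tar_count
    if S ≤ 0 then ([], [])                                   -- raise ValueError: excluded by Pre_
    else
      let sortedList := PySem.List.sorted data_list (fun x => (PySem.Dict.mk x).getD "global_filepath" "") false
      let cut : Int := PySem.Int.floordiv (train_tar_count * (sortedList.length : Int)) S
      (PySem.List.slice sortedList none (some cut), PySem.List.slice sortedList (some cut) none)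

-- ===== PRECONDITION & SPEC =====
-- Pre_ excludes exactly the inputs on which A raises ValueError (a negative count, or both counts zero).
def Pre_split_mgrs_records (data_list : List (List (String × String))) (train_tar_count : Int) (val_tar_count : Int) : Prop :=
  0 ≤ train_tar_count ∧ 0 ≤ val_tar_count ∧ 0 < train_tar_count + val_tar_count
instance (data_list : List (List (String × String))) (train_tar_count : Int) (val_tar_count : Int) : Decidable (Pre_split_mgrs_records data_list train_tar_count val_tar_count) := by unfold Pre_split_mgrs_records; infer_instance
def pvWitness_split_mgrs_records : (List (List (String × String))) × Int × Int :=
  ([[("global_filepath", "b")], [("global_filepath", "a")], []], 2, 1)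

def Spec_split_mgrs_records (data_list : List (List (String × String))) (train_tar_count : Int) (val_tar_count : Int) (out : (List (List (String × String))) × (List (List (String × String)))) : Prop := out = split_mgrs_records_alt data_list train_tar_count val_tar_count
instance (data_list : List (List (String × String))) (train_tar_count : Int) (val_tar_count : Int) (out : (List (List (String × String))) × (List (List (String × String)))) : Decidable (Spec_split_mgrs_records data_list train_tar_count val_tar_count out) := by unfold Spec_split_mgrs_records; infer_instance

-- ===== CLAIM (what is proved, stated in full; the proofs are below) =====
def Claim_equal_split_mgrs_records : Prop := ∀ (data_list : List (List (String × String))) (train_tar_count : Int) (val_tar_count : Int), Dom_split_mgrs_records data_list train_tar_count val_tar_count → Pre_split_mgrs_records data_list train_tar_count val_tar_count → Spec_split_mgrs_records data_list train_tar_count val_tar_count (split_mgrs_records data_list train_tar_count val_tar_count)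

-- ===== LEMMAS AND PROOFS =====

-- two adjacent slices of the same list concatenate to one slice
lemma slice_cat {α : Type} (L : List α) (p q r : Int) (hp : 0 ≤ p) (hpq : p ≤ q) (hqr : q ≤ r) :
    PySem.List.slice L (some p) (some q) ++ PySem.List.slice L (some q) (some r)
      = PySem.List.slice L (some p) (some r) := by
  rw [PySem.List.slice_toNat _ hp (by omega), PySem.List.slice_toNat _ (by omega : (0:Int) ≤ q) (by omega),
      PySem.List.slice_toNat _ hp (by omega)]
  rw [show L.drop q.toNat = (L.drop p.toNat).drop (q.toNat - p.toNat) by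
        rw [List.drop_drop]; congr 1; omega]
  rw [← List.take_add]
  congr 1
  omega

-- a monotone step function is monotone over a range
lemma chain_mono (f : Int → Int) (a : Int) (k : Nat)
    (hm : ∀ i, a ≤ i → i < a + k → f i ≤ f (i + 1)) : f a ≤ f (a + k) := by
  induction k with
  | zero => simp
  | succ m ih =>
      have h1 : f a ≤ f (a + m) := ih (fun i hi hi' => hm i hi (by push_cast at *; omega))
      have h2 : f (a + m) ≤ f (a + m + 1) := hm (a + m) (by omega) (by push_cast; omega)
      calc f a ≤ f (a + m) := h1
        _ ≤ f (a + (m + 1)) := by rw [show (a + ((m : Int) + 1)) = a + m + 1 by ring] at *; exact h2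

-- the extend loop over adjacent slices builds the single slice from f a to f (a+k)
lemma fold_slices {α : Type} (L : List α) (f : Int → Int) (c : Int → List α) (a : Int) (k : Nat)
    (hc : ∀ j, a ≤ j → j < a + k → c j = PySem.List.slice L (some (f j)) (some (f (j + 1))))
    (h0 : ∀ i, a ≤ i → i ≤ a + k → 0 ≤ f i)
    (hm : ∀ i, a ≤ i → i < a + k → f i ≤ f (i + 1)) (init : List α) :
    (PySem.List.pyRange a (a + k) 1).foldl (fun acc j => acc ++ c j) init
      = init ++ PySem.List.slice L (some (f a)) (some (f (a + k))) := by
  induction k generalizing init with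
  | zero =>
      have h0a : 0 ≤ f a := h0 a le_rfl (by omega)
      simp [PySem.List.pyRange, PySem.List.slice_toNat _ h0a h0a]
  | succ m ih =>
      have hab : a ≤ a + m := by omega
      have hsr : PySem.List.pyRange a (a + (m + 1 : Nat)) 1 = PySem.List.pyRange a (a + m) 1 ++ [a + m] := by
        rw [show (a + ((m : Nat) + 1 : Nat) : Int) = (a + m) + 1 by push_cast; ring]
        exact PySem.List.pyRange_one_succ_right hab
      rw [hsr, List.foldl_append]
      rw [ih (fun j hj hj' => hc j hj (by push_cast at *; omega))
            (fun i hi hi' => h0 i hi (by push_cast at *; omega))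
            (fun i hi hi' => hm i hi (by push_cast at *; omega))]
      simp only [List.foldl_cons, List.foldl_nil]
      rw [hc (a + m) (by omega) (by push_cast; omega)]
      rw [List.append_assoc]
      congr 1
      have hmono : f a ≤ f (a + m) := chain_mono f a m (fun i hi hi' => hm i hi (by push_cast at *; omega))
      have hstep : f (a + m) ≤ f (a + m + 1) := hm (a + m) (by omega) (by push_cast; omega)
      have := slice_cat L (f a) (f (a + m)) (f (a + m + 1)) (h0 a le_rfl (by omega)) hmono hstep
      rw [this, show (a + ((m : Nat) + 1 : Nat) : Int) = (a + m) + 1 by push_cast; ring]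

-- ===== VERDICT (by name: the statement is the Claim_ definition above) =====
theorem split_mgrs_records_spec : Claim_equal_split_mgrs_records := by
  intro dl t v _hdom hpre
  obtain ⟨ht, hv, hS⟩ := hpre
  have h1 : ¬(t < 0 ∨ v < 0) := by omega
  have h2 : ¬(t + v ≤ 0) := by omega
  unfold Spec_split_mgrs_records split_mgrs_records split_mgrs_records_alt
  simp only [h1, h2, if_false]
  set S : Int := t + v with hSdef
  set L := PySem.List.sorted dl (fun x => (PySem.Dict.mk x).getD "global_filepath" "") false with hL
  set n : Int := (L.length : Int) with hn
  have hn0 : 0 ≤ n := by positivity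
  set f : Int → Int := fun i => PySem.Int.floordiv (i * n) S with hf
  have hfd : ∀ i, f i = (i * n) / S := fun i => PySem.Int.floordiv_eq_ediv_of_pos hS
  have hf0 : ∀ i, 0 ≤ i → 0 ≤ f i := by
    intro i hi; rw [hfd]; exact Int.ediv_nonneg (by positivity) (le_of_lt hS)
  have hfm : ∀ i, f i ≤ f (i + 1) := by
    intro i; rw [hfd, hfd]
    exact Int.ediv_le_ediv hS (by nlinarith)
  have hfS : f S = n := by
    rw [hfd, Int.mul_comm]
    exact Int.mul_ediv_cancel _ (show S ≠ 0 from by omega)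
  have hb : ∀ i : Int, 0 ≤ i → i ≤ S →
      PySem.List.pyGetD ((PySem.List.pyRange 0 (S + 1) 1).map (fun i => PySem.Int.floordiv (i * n) S)) i 0 = f i := by
    intro i hi hi'
    exact PySem.List.pyGetD_map_pyRange_of_nonneg _ (S + 1) i 0 hi (by omega)
  set boundaries := (PySem.List.pyRange 0 (S + 1) 1).map (fun i => PySem.Int.floordiv (i * n) S) with hbd
  set chunks := (PySem.List.pyRange 0 S 1).map (fun i =>
    PySem.List.slice L (some (PySem.List.pyGetD boundaries i 0)) (some (PySem.List.pyGetD boundaries (i + 1) 0))) with hc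
  have hch : ∀ j : Int, 0 ≤ j → j < S →
      PySem.List.pyGetD chunks j [] = PySem.List.slice L (some (f j)) (some (f (j + 1))) := by
    intro j hj hj'
    rw [hc, PySem.List.pyGetD_map_pyRange_of_nonneg _ S j _ hj hj', hb j hj (by omega), hb (j + 1) (by omega) (by omega)]
  have htr : (PySem.List.pyRange 0 t 1).foldl (fun acc j => acc ++ PySem.List.pyGetD chunks j []) []
      = PySem.List.slice L (some (f 0)) (some (f t)) := by
    have h := fold_slices L f (fun j => PySem.List.pyGetD chunks j []) 0 t.toNat
      (fun j hj hj' => hch j hj (by omega)) (fun i hi _ => hf0 i hi) (fun i _ _ => hfm i) []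
    rw [show ((0 : Int) + (t.toNat : Int)) = t by omega] at h
    simpa using h
  have hvl : (PySem.List.pyRange t S 1).foldl (fun acc j => acc ++ PySem.List.pyGetD chunks j []) []
      = PySem.List.slice L (some (f t)) (some (f S)) := by
    have h := fold_slices L f (fun j => PySem.List.pyGetD chunks j []) t (S - t).toNat
      (fun j hj hj' => hch j (by omega) (by omega)) (fun i hi _ => hf0 i (by omega)) (fun i _ _ => hfm i) []
    rw [show (t + ((S - t).toNat : Int)) = S by omega] at h
    simpa using h
  have hf00 : f 0 = 0 := by rw [hfd]; simp
  have hcutnn : 0 ≤ f t := hf0 t ht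
  have hcutle : f t ≤ n := by
    have h3 := chain_mono f t (S - t).toNat (fun i _ _ => hfm i)
    rw [show (t + ((S - t).toNat : Int)) = S by omega, hfS] at h3
    exact h3
  have hdrop : PySem.List.slice L (some (f t)) (some n) = PySem.List.slice L (some (f t)) none := by
    rw [PySem.List.slice_toNat _ hcutnn hn0, PySem.List.slice_from _ hcutnn]
    apply List.take_of_length_le
    simp only [List.length_drop]
    omega
  rw [htr, hvl, hf00, PySem.List.slice_zero_start, hfS, hdrop]
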